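-- pv_equiv track=rewrite | github.com/h1376h/MLCourse | ML_Obsidian_Vault/Lectures/5/Codes/L5_3_9_solution.py | string_kmer_kernel
-- ===== SOURCE A (Python) =====
-- from collections import Counter
--
-- def string_kmer_kernel(seq1, seq2, k=3):
--     """
--     String kernel for DNA sequences based on k-mer counting.
--
--     Args:
--         seq1, seq2: DNA sequences (strings)
--         k: length of k-mers (subsequences)
--
--     Returns:
--         Kernel value (similarity score)
--     """
--     # Generate all k-mers for both sequences
--     kmers1 = [seq1[i:i+k] for i in range(len(seq1) - k + 1)]
--     kmers2 = [seq2[i:i+k] for i in range(len(seq2) - k + 1)]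
--
--     # Count k-mers
--     count1 = Counter(kmers1)
--     count2 = Counter(kmers2)
--
--     # Calculate kernel value as dot product of k-mer count vectors
--     kernel_value = 0
--     all_kmers = set(count1.keys()) | set(count2.keys())
--
--     for kmer in all_kmers:
--         kernel_value += count1.get(kmer, 0) * count2.get(kmer, 0)
--
--     return kernel_value
-- ===== SOURCE B (Python) =====
-- def string_kmer_kernel(seq1, seq2, k=3):
--     """K-mer dot-product kernel by sort-and-merge: sort both k-mer lists and
--     walk them with two pointers, multiplying the lengths of equal runs.
--     No Counter, no dict lookups, no union-of-keys set."""
--     xs = sorted(seq1[i:i+k] for i in range(len(seq1) - k + 1))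
--     ys = sorted(seq2[i:i+k] for i in range(len(seq2) - k + 1))
--     total = 0
--     i = j = 0
--     while i < len(xs) and j < len(ys):
--         if xs[i] < ys[j]:
--             i += 1
--         elif ys[j] < xs[i]:
--             j += 1
--         else:
--             w = xs[i]
--             c1 = 0
--             while i < len(xs) and xs[i] == w:
--                 i += 1
--                 c1 += 1
--             c2 = 0
--             while j < len(ys) and ys[j] == w:
--                 j += 1
--                 c2 += 1
--             total += c1 * c2
--     return total
-- ===== Notes on version B (the rewrite author's own statement) =====
-- stated objective: alternative
-- what changed: B replaces the two hash Counters plus union-of-keys set with sort-and-merge: it sorts both k-mer lists and walks them with two pointers, adding the product of the lengths of each pair of equal runs.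
import Mathlib
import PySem

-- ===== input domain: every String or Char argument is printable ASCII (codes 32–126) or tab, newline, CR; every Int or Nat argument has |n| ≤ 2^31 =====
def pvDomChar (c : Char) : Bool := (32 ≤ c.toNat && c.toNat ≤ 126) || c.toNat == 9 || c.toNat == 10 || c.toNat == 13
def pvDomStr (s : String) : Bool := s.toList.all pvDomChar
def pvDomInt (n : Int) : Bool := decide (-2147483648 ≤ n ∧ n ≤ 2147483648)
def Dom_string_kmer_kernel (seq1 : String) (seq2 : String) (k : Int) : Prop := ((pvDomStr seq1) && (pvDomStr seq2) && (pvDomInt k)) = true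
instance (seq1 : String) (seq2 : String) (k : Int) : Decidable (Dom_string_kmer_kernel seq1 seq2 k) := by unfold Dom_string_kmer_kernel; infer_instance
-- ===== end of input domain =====

-- B replaces the Counters and the union-of-keys set with sort-and-merge: both
-- k-mer lists are sorted and walked with two pointers, multiplying equal-run lengths.

-- ===== PORT A =====
def string_kmer_kernel (seq1 : String) (seq2 : String) (k : Int) : Int :=
  let kmers1 := (PySem.List.pyRange 0 (PySem.Str.len seq1 - k + 1) 1).map
      (fun i => PySem.Str.slice seq1 (some i) (some (i + k)))
  let kmers2 := (PySem.List.pyRange 0 (PySem.Str.len seq2 - k + 1) 1).map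
      (fun i => PySem.Str.slice seq2 (some i) (some (i + k)))
  let count1 := PySem.Dict.counter kmers1
  let count2 := PySem.Dict.counter kmers2
  let allKmers := PySem.Set.union (PySem.Set.ofList count1.keys) (PySem.Set.ofList count2.keys)
  allKmers.foldl (fun acc m => acc + count1.getD m 0 * count2.getD m 0) 0

-- ===== PORT B =====
-- inner while loop: count the leading run equal to w, return (run length, rest)
def skipRun (w : String) : List String → Nat × List String
  | [] => (0, [])
  | x :: t => if x = w then ((skipRun w t).1 + 1, (skipRun w t).2) else (0, x :: t)

-- termination helper for mergeDot (the pointers only advance)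
lemma skipRun_len (w : String) (l : List String) : (skipRun w l).2.length ≤ l.length := by
  induction l with
  | nil => simp [skipRun]
  | cons x t ih =>
    by_cases h : x = w
    · simp only [skipRun, if_pos h]; exact Nat.le_succ_of_le ih
    · simp [skipRun, if_neg h]

-- outer while loop: two pointers over the sorted lists, total accumulated
def mergeDot (xs ys : List String) (total : Int) : Int :=
  match xs, ys with
  | [], _ => total
  | _ :: _, [] => total
  | x :: xs', y :: ys' =>
    if x < y then mergeDot xs' (y :: ys') total
    else if y < x then mergeDot (x :: xs') ys' total
    else
      let p1 := skipRun x (x :: xs')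
      let p2 := skipRun x (y :: ys')
      mergeDot p1.2 p2.2 (total + (p1.1 : Int) * (p2.1 : Int))
termination_by xs.length + ys.length
decreasing_by
  · simp only [List.length_cons]; omega
  · simp only [List.length_cons]; omega
  · have h1 : (skipRun x (x :: xs')).2.length ≤ xs'.length := by
      simpa [skipRun] using skipRun_len x xs'
    have h2 : (skipRun x (y :: ys')).2.length ≤ (y :: ys').length := skipRun_len x (y :: ys')
    simp only [List.length_cons] at *
    omega

def string_kmer_kernel_alt (seq1 : String) (seq2 : String) (k : Int) : Int :=
  let xs := PySem.List.sorted ((PySem.List.pyRange 0 (PySem.Str.len seq1 - k + 1) 1).map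
      (fun i => PySem.Str.slice seq1 (some i) (some (i + k)))) (fun s => s) false
  let ys := PySem.List.sorted ((PySem.List.pyRange 0 (PySem.Str.len seq2 - k + 1) 1).map
      (fun i => PySem.Str.slice seq2 (some i) (some (i + k)))) (fun s => s) false
  mergeDot xs ys 0

-- ===== PRECONDITION & SPEC =====
def Spec_string_kmer_kernel (seq1 : String) (seq2 : String) (k : Int) (out : Int) : Prop := out = string_kmer_kernel_alt seq1 seq2 k
instance (seq1 : String) (seq2 : String) (k : Int) (out : Int) : Decidable (Spec_string_kmer_kernel seq1 seq2 k out) := by unfold Spec_string_kmer_kernel; infer_instance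

-- ===== CLAIM (what is proved, stated in full; the proofs are below) =====
def Claim_equal_string_kmer_kernel : Prop := ∀ (seq1 : String) (seq2 : String) (k : Int), Dom_string_kmer_kernel seq1 seq2 k → Spec_string_kmer_kernel seq1 seq2 k (string_kmer_kernel seq1 seq2 k)

-- ===== LEMMAS AND PROOFS =====

-- The dot product as a function of the two (multi-)lists of k-mers.
def dotS (xs ys : List String) : Int := (ys.map (fun y => ((xs.count y : Nat) : Int))).sum

-- Summing 'if m = y then f m else 0' over a duplicate-free list containing y picks out f y.
lemma sum_map_ite_single (L : List String) (f : String → Int) (y : String)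
    (hnd : L.Nodup) (hy : y ∈ L) :
    (L.map (fun m => if m = y then f m else 0)).sum = f y := by
  induction L with
  | nil => cases hy
  | cons a L ih =>
    rw [List.nodup_cons] at hnd
    by_cases h : a = y
    · subst h
      have hz : ∀ m ∈ L, (if m = a then f m else 0) = 0 :=
        fun m hm => if_neg (by rintro rfl; exact hnd.1 hm)
      have : (L.map (fun m => if m = a then f m else 0)).sum = 0 :=
        List.sum_eq_zero (fun x hx => by
          rcases List.mem_map.mp hx with ⟨m, hm, rfl⟩; exact hz m hm)
      simp [this]
    · rcases List.mem_cons.mp hy with h' | h'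
      · exact absurd h'.symm h
      · simp [h, ih hnd.2 h']

-- Grouping: the f-weighted count-sum over any duplicate-free superlist L of ys
-- equals the plain sum of f over ys (duplicates kept).
lemma sum_counts_eq (L : List String) (f : String → Int) (hnd : L.Nodup) :
    ∀ ys : List String, (∀ y ∈ ys, y ∈ L) →
      (L.map (fun m => f m * (ys.count m : Int))).sum = (ys.map f).sum := by
  intro ys
  induction ys with
  | nil => intro _; simp
  | cons y ys ih =>
    intro hsub
    have hmem : y ∈ L := hsub y (List.mem_cons_self)
    have hsub' : ∀ z ∈ ys, z ∈ L := fun z hz => hsub z (List.mem_cons_of_mem _ hz)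
    have hsplit : ∀ m : String,
        f m * (((y :: ys).count m : Nat) : Int)
          = f m * (ys.count m : Int) + (if m = y then f m else 0) := by
      intro m
      by_cases h : m = y
      · subst h; push_cast [List.count_cons]; simp; ring
      · simp [List.count_cons, h]
        exact Or.inl (fun he => h he.symm)
    calc (L.map (fun m => f m * ((y :: ys).count m : Int))).sum
        = (L.map (fun m => f m * (ys.count m : Int) + (if m = y then f m else 0))).sum := by
          congr 1; exact List.map_congr_left (fun m _ => hsplit m)
      _ = (L.map (fun m => f m * (ys.count m : Int))).sum
            + (L.map (fun m => if m = y then f m else 0)).sum := by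
          rw [← List.sum_map_add]
      _ = (ys.map f).sum + f y := by
          rw [ih hsub', sum_map_ite_single L f y hnd hmem]
      _ = ((y :: ys).map f).sum := by simp [List.map_cons, List.sum_cons]; ring

-- A's union-set loop of count products equals the dot product dotS.
lemma dot_eq (xs ys : List String) :
    (PySem.Set.union (PySem.Set.ofList (PySem.Dict.counter xs).keys)
        (PySem.Set.ofList (PySem.Dict.counter ys).keys)).foldl
      (fun acc m => acc + (PySem.Dict.counter xs).getD m 0 * (PySem.Dict.counter ys).getD m 0) 0
    = dotS xs ys := by
  set L := PySem.Set.union (PySem.Set.ofList (PySem.Dict.counter xs).keys)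
      (PySem.Set.ofList (PySem.Dict.counter ys).keys) with hL
  have hnd : L.Nodup := PySem.Set.nodup_union _ _ (PySem.Set.nodup_ofList _)
  have hsub : ∀ y ∈ ys, y ∈ L := by
    intro y hy
    rw [hL]
    apply (PySem.Set.mem_union _ _ _).mpr
    right
    rw [PySem.Set.mem_ofList, PySem.Dict.keys_counter, PySem.Set.mem_ofList]
    exact hy
  rw [PySem.List.foldl_add]
  simp only [PySem.Dict.getD_counter, zero_add]
  exact sum_counts_eq L (fun m => (xs.count m : Int)) hnd ys hsub

-- dotS is invariant under permutation of either argument.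
lemma dotS_perm (xs xs' ys ys' : List String) (h1 : xs.Perm xs') (h2 : ys.Perm ys') :
    dotS xs ys = dotS xs' ys' := by
  unfold dotS
  have hfun : (fun y => ((xs.count y : Nat) : Int)) = (fun y => ((xs'.count y : Nat) : Int)) := by
    funext y; rw [h1.count_eq]
  rw [hfun]
  exact (h2.map _).sum_eq

-- skipRun splits off exactly a leading replicate block.
lemma skipRun_append (w : String) (l : List String) :
    List.replicate (skipRun w l).1 w ++ (skipRun w l).2 = l := by
  induction l with
  | nil => simp [skipRun]
  | cons x t ih =>
    by_cases h : x = w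
    · rw [show skipRun w (x :: t) = ((skipRun w t).1 + 1, (skipRun w t).2) from by
        simp [skipRun, h]]
      simp [List.replicate_succ, ih, h]
    · simp [skipRun, if_neg h]

-- the rest returned by skipRun does not start with w
lemma skipRun_ne_head (w : String) (l : List String) (h t' : _)
    (he : (skipRun w l).2 = h :: t') : h ≠ w := by
  induction l with
  | nil => simp [skipRun] at he
  | cons x t ih =>
    by_cases hx : x = w
    · simp only [skipRun, if_pos hx] at he; exact ih he
    · simp only [skipRun, if_neg hx] at he
      cases he; exact fun hh => hx (by simpa using hh)

-- on a sorted list starting with w: skipRun removes exactly the w's, the rest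
-- is sorted and strictly above w, and the run length is the multiplicity of w
lemma skipRun_run (w : String) (l' : List String)
    (hp : (w :: l').Pairwise (· ≤ ·)) :
    (w :: l') = List.replicate (skipRun w (w :: l')).1 w ++ (skipRun w (w :: l')).2 ∧
    (skipRun w (w :: l')).2.Pairwise (· ≤ ·) ∧
    (∀ b ∈ (skipRun w (w :: l')).2, w < b) ∧
    (skipRun w (w :: l')).1 = (w :: l').count w := by
  have heq := (skipRun_append w (w :: l')).symm
  have hsuf : (skipRun w (w :: l')).2 <:+ (w :: l') := ⟨_, heq.symm⟩
  have hsub := hsuf.sublist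
  have hpr : (skipRun w (w :: l')).2.Pairwise (· ≤ ·) := hp.sublist hsub
  have hgt : ∀ b ∈ (skipRun w (w :: l')).2, w < b := by
    cases hr : (skipRun w (w :: l')).2 with
    | nil => intro b hb; simp at hb
    | cons h t' =>
      have hne : h ≠ w := skipRun_ne_head w (w :: l') h t' hr
      have hhmem : h ∈ w :: l' := hsub.mem (hr ▸ List.mem_cons_self)
      have hwle : w ≤ h := by
        rcases List.mem_cons.mp hhmem with h' | h'
        · exact le_of_eq h'.symm
        · exact (List.pairwise_cons.mp hp).1 h h'
      have hwlt : w < h := lt_of_le_of_ne hwle (fun he => hne he.symm)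
      intro b hb
      rw [hr] at hpr
      rcases List.mem_cons.mp hb with rfl | hb'
      · exact hwlt
      · exact lt_of_lt_of_le hwlt ((List.pairwise_cons.mp hpr).1 b hb')
  refine ⟨heq, hpr, hgt, ?_⟩
  have hzero : (skipRun w (w :: l')).2.count w = 0 :=
    List.count_eq_zero.mpr (fun hmem => lt_irrefl w (hgt w hmem))
  conv_rhs => rw [heq]
  rw [List.count_append, List.count_replicate, hzero]
  simp

-- dotS: simple structural facts
lemma dotS_nil_left (ys : List String) : dotS [] ys = 0 := by
  unfold dotS
  exact List.sum_eq_zero (fun x hx => by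
    rcases List.mem_map.mp hx with ⟨y, _, rfl⟩; simp)

lemma dotS_cons_right (xs : List String) (y : String) (ys : List String) :
    dotS xs (y :: ys) = (xs.count y : Int) + dotS xs ys := by
  simp [dotS]

lemma dotS_drop_left (x : String) (xs ys : List String) (h : ∀ y ∈ ys, y ≠ x) :
    dotS (x :: xs) ys = dotS xs ys := by
  unfold dotS
  congr 1
  apply List.map_congr_left
  intro y hy
  have : ((x :: xs).count y) = xs.count y := by
    rw [List.count_cons]
    simp [beq_eq_false_iff_ne.mpr (fun he => h y hy he.symm)]
  rw [this]

lemma dotS_append_right (xs as bs : List String) :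
    dotS xs (as ++ bs) = dotS xs as + dotS xs bs := by
  simp [dotS]

lemma dotS_replicate_right (xs : List String) (c : Nat) (w : String) :
    dotS xs (List.replicate c w) = (c : Int) * (xs.count w : Int) := by
  unfold dotS
  rw [List.map_replicate, List.sum_replicate]
  simp

lemma dotS_replicate_append_left (c : Nat) (w : String) (xr ys : List String)
    (h : ∀ y ∈ ys, y ≠ w) :
    dotS (List.replicate c w ++ xr) ys = dotS xr ys := by
  unfold dotS
  congr 1
  apply List.map_congr_left
  intro y hy
  have : (List.replicate c w ++ xr).count y = xr.count y := by
    rw [List.count_append, List.count_replicate]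
    simp [beq_eq_false_iff_ne.mpr (fun he => h y hy he.symm)]
  rw [this]

-- The merge of two sorted lists computes the dot product (accumulated onto t).
lemma mergeDot_eq (n : Nat) : ∀ (xs ys : List String) (t : Int),
    xs.length + ys.length ≤ n → xs.Pairwise (· ≤ ·) → ys.Pairwise (· ≤ ·) →
    mergeDot xs ys t = t + dotS xs ys := by
  induction n with
  | zero =>
    intro xs ys t hlen _ _
    have hx : xs = [] := List.length_eq_zero_iff.mp (by omega)
    subst hx
    rw [mergeDot, dotS_nil_left]; ring
  | succ n ih =>
    intro xs ys t hlen hpx hpy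
    match xs, ys with
    | [], ys => rw [mergeDot, dotS_nil_left]; ring
    | x :: xs', [] => rw [mergeDot]; simp [dotS]
    | x :: xs', y :: ys' =>
      rw [mergeDot]
      by_cases hxy : x < y
      · rw [if_pos hxy]
        have hrec := ih xs' (y :: ys') t (by simp at hlen ⊢; omega)
          (List.pairwise_cons.mp hpx).2 hpy
        rw [hrec]
        congr 1
        symm
        apply dotS_drop_left
        intro z hz
        have hyz : y ≤ z := by
          rcases List.mem_cons.mp hz with rfl | hz'
          · exact le_refl _
          · exact (List.pairwise_cons.mp hpy).1 z hz'
        exact fun he => absurd (he ▸ hyz : y ≤ x) (not_le.mpr hxy)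
      · rw [if_neg hxy]
        by_cases hyx : y < x
        · rw [if_pos hyx]
          have hrec := ih (x :: xs') ys' t (by simp at hlen ⊢; omega)
            hpx (List.pairwise_cons.mp hpy).2
          rw [hrec, dotS_cons_right]
          have hzero : (x :: xs').count y = 0 := by
            apply List.count_eq_zero.mpr
            intro hmem
            rcases List.mem_cons.mp hmem with he | hmem'
            · exact absurd (he ▸ hyx) (lt_irrefl x)
            · exact absurd (lt_of_le_of_lt ((List.pairwise_cons.mp hpx).1 y hmem') hyx)
                (lt_irrefl x)
          rw [hzero]; ring
        · rw [if_neg hyx]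
          have hxe : x = y := le_antisymm (le_of_not_gt hyx) (le_of_not_gt hxy)
          subst hxe
          obtain ⟨heq1, hpr1, hgt1, hc1⟩ := skipRun_run x xs' hpx
          obtain ⟨heq2, hpr2, hgt2, hc2⟩ := skipRun_run x ys' hpy
          set c1 := (skipRun x (x :: xs')).1
          set xr := (skipRun x (x :: xs')).2
          set c2 := (skipRun x (x :: ys')).1
          set yr := (skipRun x (x :: ys')).2
          have hlen1 : (x :: xs').length = c1 + xr.length := by
            rw [heq1]; simp
          have hlen2 : (x :: ys').length = c2 + yr.length := by
            rw [heq2]; simp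
          have hc1pos : 1 ≤ c1 := by
            rcases Nat.eq_zero_or_pos c1 with h0 | h; swap; · exact h
            rw [h0] at heq1
            simp at heq1
            exact absurd heq1 (fun he => lt_irrefl x (hgt1 x (he ▸ List.mem_cons_self)))
          have hc2pos : 1 ≤ c2 := by
            rcases Nat.eq_zero_or_pos c2 with h0 | h; swap; · exact h
            rw [h0] at heq2
            simp at heq2
            exact absurd heq2 (fun he => lt_irrefl x (hgt2 x (he ▸ List.mem_cons_self)))
          have hrec := ih xr yr (t + (c1 : Int) * (c2 : Int))
            (by simp only [List.length_cons] at hlen hlen1 hlen2; omega) hpr1 hpr2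
          rw [hrec]
          have hdS : dotS (x :: xs') (x :: ys') = (c1 : Int) * (c2 : Int) + dotS xr yr := by
            rw [heq1, heq2, dotS_append_right, dotS_replicate_right]
            have hcnt : ((List.replicate c1 x ++ xr).count x : Int) = (c1 : Int) := by
              rw [List.count_append, List.count_replicate]
              have : xr.count x = 0 :=
                List.count_eq_zero.mpr (fun hm => lt_irrefl x (hgt1 x hm))
              simp [this]
            rw [hcnt]
            congr 1
            · ring
            · exact dotS_replicate_append_left c1 x xr yr
                (fun y hy => fun he => lt_irrefl x (he ▸ hgt2 y hy))
          rw [hdS]; ring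

-- ===== VERDICT (by name: the statement is the Claim_ definition above) =====
theorem string_kmer_kernel_spec : Claim_equal_string_kmer_kernel := by
  intro seq1 seq2 k _
  unfold Spec_string_kmer_kernel string_kmer_kernel string_kmer_kernel_alt
  simp only []
  set xs0 := (PySem.List.pyRange 0 (PySem.Str.len seq1 - k + 1) 1).map
      (fun i => PySem.Str.slice seq1 (some i) (some (i + k))) with hxs0
  set ys0 := (PySem.List.pyRange 0 (PySem.Str.len seq2 - k + 1) 1).map
      (fun i => PySem.Str.slice seq2 (some i) (some (i + k))) with hys0
  set xs := PySem.List.sorted xs0 (fun s => s) false with hxs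
  set ys := PySem.List.sorted ys0 (fun s => s) false with hys
  have hperm1 : xs.Perm xs0 := PySem.List.sorted_perm _ _ _
  have hperm2 : ys.Perm ys0 := PySem.List.sorted_perm _ _ _
  have hpx : xs.Pairwise (· ≤ ·) := PySem.List.sorted_pairwise _ _
  have hpy : ys.Pairwise (· ≤ ·) := PySem.List.sorted_pairwise _ _
  rw [dot_eq xs0 ys0, dotS_perm xs0 xs ys0 ys hperm1.symm hperm2.symm,
    mergeDot_eq (xs.length + ys.length) xs ys 0 (le_refl _) hpx hpy]
  ring
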